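-- pv_equiv track=rewrite | github.com/Kris465/MemoryBox | block11/task155.py | remove_by_values
-- ===== SOURCE A (Python) =====
-- def remove_by_values(heights, h1, h2):
--     new_heights = []
--     removed_h1 = False
--     removed_h2 = False
--
--     for h in heights:
--         if not removed_h1 and h == h1:
--             removed_h1 = True
--         elif not removed_h2 and h == h2:
--             removed_h2 = True
--         else:
--             new_heights.append(h)
--     return new_heights
-- ===== SOURCE B (Python) =====
-- def remove_by_values(heights, h1, h2):
--     result = list(heights)
--     try:
--         result.remove(h1)
--     except ValueError:
--         pass
--     try:
--         result.remove(h2)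
--     except ValueError:
--         pass
--     return result
-- ===== Notes on version B (the rewrite author's own statement) =====
-- stated objective: idiomatic
-- what changed: Replaces the manual single pass with removed_h1/removed_h2 flags by copying the list and calling list.remove for h1 and then h2, each guarded by try/except ValueError.
import Mathlib
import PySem

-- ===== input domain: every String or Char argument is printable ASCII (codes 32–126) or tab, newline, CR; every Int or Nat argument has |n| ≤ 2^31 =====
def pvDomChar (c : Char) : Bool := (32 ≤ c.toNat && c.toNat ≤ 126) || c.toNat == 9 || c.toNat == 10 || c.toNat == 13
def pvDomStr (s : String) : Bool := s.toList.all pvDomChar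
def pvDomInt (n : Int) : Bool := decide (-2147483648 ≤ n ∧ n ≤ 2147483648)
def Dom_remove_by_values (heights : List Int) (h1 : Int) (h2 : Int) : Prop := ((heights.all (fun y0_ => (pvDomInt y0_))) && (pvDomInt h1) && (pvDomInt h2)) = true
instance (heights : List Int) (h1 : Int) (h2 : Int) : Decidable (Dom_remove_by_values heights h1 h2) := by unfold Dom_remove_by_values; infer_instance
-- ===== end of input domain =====

-- B copies the list and delegates first-occurrence removal of h1 then h2 to list.remove
-- guarded by try/except, instead of A's one manual pass with removed_h1/removed_h2 flags (idiomatic).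


-- ===== PORT A =====
-- the for-loop over heights with state (new_heights, removed_h1, removed_h2)
def removeLoop (hs : List Int) (h1 h2 : Int) (acc : List Int) (r1 r2 : Bool) : List Int :=
  match hs with
  | [] => acc
  | h :: t =>
    if !r1 && h == h1 then removeLoop t h1 h2 acc true r2
    else if !r2 && h == h2 then removeLoop t h1 h2 acc r1 true
    else removeLoop t h1 h2 (acc ++ [h]) r1 r2

def remove_by_values (heights : List Int) (h1 : Int) (h2 : Int) : List Int :=
  removeLoop heights h1 h2 [] false false

-- ===== PORT B =====
-- result.remove(v) inside try/except ValueError: pass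
def tryRemove (l : List Int) (v : Int) : List Int :=
  match PySem.List.remove? l v with
  | some l' => l'
  | none => l

def remove_by_values_alt (heights : List Int) (h1 : Int) (h2 : Int) : List Int :=
  tryRemove (tryRemove heights h1) h2

-- ===== PRECONDITION & SPEC =====
def Spec_remove_by_values (heights : List Int) (h1 : Int) (h2 : Int) (out : List Int) : Prop := out = remove_by_values_alt heights h1 h2
instance (heights : List Int) (h1 : Int) (h2 : Int) (out : List Int) : Decidable (Spec_remove_by_values heights h1 h2 out) := by unfold Spec_remove_by_values; infer_instance

-- ===== CLAIM (what is proved, stated in full; the proofs are below) =====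
def Claim_equal_remove_by_values : Prop := ∀ (heights : List Int) (h1 : Int) (h2 : Int), Dom_remove_by_values heights h1 h2 → Spec_remove_by_values heights h1 h2 (remove_by_values heights h1 h2)

-- ===== LEMMAS AND PROOFS =====

theorem tryRemove_cons_self (t : List Int) (v : Int) : tryRemove (v :: t) v = t := by
  simp [tryRemove, PySem.List.remove?_cons_self]

theorem tryRemove_cons_of_ne (t : List Int) (x v : Int) (h : x ≠ v) :
    tryRemove (x :: t) v = x :: tryRemove t v := by
  simp only [tryRemove, PySem.List.remove?_cons_of_ne t h]
  cases PySem.List.remove? t v <;> simp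

theorem removeLoop_true_true (t : List Int) (h1 h2 : Int) (acc : List Int) :
    removeLoop t h1 h2 acc true true = acc ++ t := by
  induction t generalizing acc with
  | nil => simp [removeLoop]
  | cons x xs ih => simp [removeLoop, ih]

theorem removeLoop_true_false (t : List Int) (h1 h2 : Int) (acc : List Int) :
    removeLoop t h1 h2 acc true false = acc ++ tryRemove t h2 := by
  induction t generalizing acc with
  | nil => simp [removeLoop, tryRemove, PySem.List.remove?]
  | cons x xs ih =>
    by_cases hx : x = h2
    · subst hx
      simp [removeLoop, tryRemove_cons_self, removeLoop_true_true]
    · simp [removeLoop, hx, ih, tryRemove_cons_of_ne xs x h2 hx]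

theorem removeLoop_false_true (t : List Int) (h1 h2 : Int) (acc : List Int) :
    removeLoop t h1 h2 acc false true = acc ++ tryRemove t h1 := by
  induction t generalizing acc with
  | nil => simp [removeLoop, tryRemove, PySem.List.remove?]
  | cons x xs ih =>
    by_cases hx : x = h1
    · subst hx
      simp [removeLoop, tryRemove_cons_self, removeLoop_true_true]
    · simp [removeLoop, hx, ih, tryRemove_cons_of_ne xs x h1 hx]

theorem removeLoop_false_false (t : List Int) (h1 h2 : Int) (acc : List Int) :
    removeLoop t h1 h2 acc false false = acc ++ tryRemove (tryRemove t h1) h2 := by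
  induction t generalizing acc with
  | nil => simp [removeLoop, tryRemove, PySem.List.remove?]
  | cons x xs ih =>
    by_cases hx1 : x = h1
    · subst hx1
      simp [removeLoop, tryRemove_cons_self, removeLoop_true_false]
    · by_cases hx2 : x = h2
      · subst hx2
        simp [removeLoop, hx1, removeLoop_false_true,
          tryRemove_cons_of_ne xs x h1 hx1, tryRemove_cons_self]
      · simp [removeLoop, hx1, hx2, ih,
          tryRemove_cons_of_ne xs x h1 hx1,
          tryRemove_cons_of_ne (tryRemove xs h1) x h2 hx2]

-- ===== VERDICT (by name: the statement is the Claim_ definition above) =====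
theorem remove_by_values_spec : Claim_equal_remove_by_values := by
  intro heights h1 h2 _
  show remove_by_values heights h1 h2 = remove_by_values_alt heights h1 h2
  simp [remove_by_values, remove_by_values_alt, removeLoop_false_false]
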